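-- pv_equiv track=rewrite | github.com/ReZorg/delovecho | Archecho/unreal-echo/engines/simplex_engine.py | simplex_fvector
-- ===== SOURCE A (Python) =====
-- from typing import List, Dict, Tuple
--
-- def pascal_row(n: int) -> List[int]:
--     """Row n of Pascal's triangle: [C(n,0), C(n,1), ..., C(n,n)]"""
--     row = [1]
--     for k in range(1, n + 1):
--         row.append(row[-1] * (n - k + 1) // k)
--     return row
--
-- def simplex_fvector(dim: int) -> dict:
--     """f-vector of the dim-simplex.
--
--     dim=2: triangle, dim=3: tetrahedron, etc.
--     Returns dict with keys: vertices, edges, faces, cells, ...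
--     """
--     row = pascal_row(dim + 1)
--     names = ['void', 'vertices', 'edges', 'faces', 'cells',
--              'hyperfaces', '5-faces', '6-faces', '7-faces']
--     result = {}
--     for i, (count, name) in enumerate(zip(row, names)):
--         result[name] = count
--     return result
-- ===== SOURCE B (Python) =====
-- def simplex_fvector(dim: int) -> dict:
--     """f-vector of the dim-simplex, streaming: running binomial coefficient,
--     never building the full Pascal row."""
--     names = ['void', 'vertices', 'edges', 'faces', 'cells',
--              'hyperfaces', '5-faces', '6-faces', '7-faces']
--     n = dim + 1
--     result = {'void': 1}
--     c = 1
--     for i in range(1, len(names)):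
--         if i > n:
--             break
--         c = c * (n - i + 1) // i
--         result[names[i]] = c
--     return result
-- ===== Notes on version B (the rewrite author's own statement) =====
-- stated objective: faster
-- what changed: B streams a single running binomial coefficient over the fixed list of face names (stopping once the index exceeds dim+1) instead of materialising the entire Pascal row of length dim+2 and zip-truncating it against the names.
import Mathlib
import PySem

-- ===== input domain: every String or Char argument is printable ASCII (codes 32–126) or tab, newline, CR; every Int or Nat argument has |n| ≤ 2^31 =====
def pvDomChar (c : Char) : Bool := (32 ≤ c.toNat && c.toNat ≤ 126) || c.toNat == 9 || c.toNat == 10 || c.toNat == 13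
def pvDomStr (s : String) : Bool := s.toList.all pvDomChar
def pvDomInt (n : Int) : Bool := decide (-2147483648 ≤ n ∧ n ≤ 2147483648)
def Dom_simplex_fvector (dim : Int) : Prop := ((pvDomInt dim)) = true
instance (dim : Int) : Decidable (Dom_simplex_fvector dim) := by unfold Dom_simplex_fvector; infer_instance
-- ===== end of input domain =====

-- B streams a running binomial coefficient over at most the 9 names instead of building A's full Pascal row of length dim+2: faster.

-- ===== PORT A =====
-- row[-1] on the always-nonempty accumulator: pyGet? (-1), defaulted (the default is never hit).
def pascal_row (n : Int) : List Int :=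
  (PySem.List.pyRange 1 (n + 1) 1).foldl
    (fun row k => row ++ [PySem.Int.floordiv (((PySem.List.pyGet? row (-1)).getD 0) * (n - k + 1)) k])
    [1]

def fvNames : List String :=
  ["void", "vertices", "edges", "faces", "cells", "hyperfaces", "5-faces", "6-faces", "7-faces"]

def simplex_fvector (dim : Int) : List (String × Int) :=
  let row := pascal_row (dim + 1)
  ((List.zip row fvNames).foldl
      (fun (result : PySem.Dict String Int) cn => result.insert cn.2 cn.1)
      PySem.Dict.empty).items

-- ===== PORT B =====
-- the loop 'for i in range(1, len(names)): if i > n: break; c = c*(n-i+1)//i; result[names[i]] = c',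
-- as structural recursion over names[1:] carrying the counter i and the running coefficient c
def altGo (n : Int) : Int → Int → List String → PySem.Dict String Int → PySem.Dict String Int
  | _, _, [], result => result
  | i, c, name :: rest, result =>
    if i > n then result
    else
      let c' := PySem.Int.floordiv (c * (n - i + 1)) i
      altGo n (i + 1) c' rest (result.insert name c')

def simplex_fvector_alt (dim : Int) : List (String × Int) :=
  let n := dim + 1
  (altGo n 1 1 (fvNames.drop 1) (PySem.Dict.empty.insert "void" 1)).items

-- ===== PRECONDITION & SPEC =====
def Spec_simplex_fvector (dim : Int) (out : List (String × Int)) : Prop := out = simplex_fvector_alt dim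
instance (dim : Int) (out : List (String × Int)) : Decidable (Spec_simplex_fvector dim out) := by unfold Spec_simplex_fvector; infer_instance

-- ===== CLAIM (what is proved, stated in full; the proofs are below) =====
def Claim_equal_simplex_fvector : Prop := ∀ (dim : Int), Dom_simplex_fvector dim → Spec_simplex_fvector dim (simplex_fvector dim)

-- ===== LEMMAS AND PROOFS =====

theorem pv_pyGet_concat {α : Type} (l : List α) (a : α) :
    PySem.List.pyGet? (l ++ [a]) (-1) = some a := by
  simp [PySem.List.pyGet?, PySem.List.pyIdx?]

-- one multiplicative step of the Pascal recurrence, with exact floor division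
theorem pv_choose_step (N k : ℕ) (h1 : 1 ≤ k) (h2 : k ≤ N) :
    PySem.Int.floordiv ((N.choose (k - 1) : Int) * ((N : Int) - k + 1)) k = (N.choose k : Int) := by
  have hk : (N : Int) - k + 1 = ((N - (k - 1) : ℕ) : Int) := by
    have : k - 1 ≤ N := by omega
    push_cast [this]
    omega
  obtain ⟨j, rfl⟩ : ∃ j, k = j + 1 := ⟨k - 1, by omega⟩
  rw [hk, ← Nat.cast_mul]
  have hrec : N.choose (j + 1 - 1) * (N - (j + 1 - 1)) = N.choose (j + 1) * (j + 1) := by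
    simpa using (Nat.choose_succ_right_eq N j).symm
  rw [hrec, PySem.Int.floordiv_natCast, Nat.mul_div_cancel _ (by omega)]

-- zip truncates against the shorter list
theorem pv_zip_trunc {α β : Type} (xs : List α) (ys : List β) :
    List.zip xs ys = List.zip (xs.take ys.length) ys := by
  induction xs generalizing ys with
  | nil => simp
  | cons x xs ih =>
    cases ys with
    | nil => simp
    | cons y ys => simp [List.zip_cons_cons, ih ys]

-- loop invariant of A's pascal_row fold: after m steps the row is [C(N,0), …, C(N,m)]
theorem pv_pascal_aux (N : ℕ) (m : ℕ) (hm : m ≤ N) :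
    (PySem.List.pyRange 1 ((m : Int) + 1) 1).foldl
      (fun row k => row ++ [PySem.Int.floordiv (((PySem.List.pyGet? row (-1)).getD 0) * ((N : Int) - k + 1)) k])
      [1]
    = (List.range (m + 1)).map (fun k => (N.choose k : Int)) := by
  induction m with
  | zero => simp [PySem.List.pyRange_one_eq_nil]
  | succ m ih =>
    have h1 : ((m + 1 : ℕ) : Int) + 1 = ((m : Int) + 1) + 1 := by push_cast; ring
    rw [h1, PySem.List.pyRange_one_succ_right (by omega), List.foldl_append]
    rw [ih (by omega)]
    have hlast : (List.range (m + 1)).map (fun k => (N.choose k : Int))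
        = (List.range m).map (fun k => (N.choose k : Int)) ++ [(N.choose m : Int)] := by
      rw [List.range_succ]; simp
    rw [List.foldl_cons, List.foldl_nil]
    rw [hlast, pv_pyGet_concat]
    rw [← hlast]
    have hstep : PySem.Int.floordiv ((N.choose m : Int) * ((N : Int) - ((m : Int) + 1) + 1)) ((m : Int) + 1)
        = (N.choose (m + 1) : Int) := by
      have := pv_choose_step N (m + 1) (by omega) (by omega)
      simpa using this
    simp only [Option.getD_some]
    rw [hstep]
    rw [List.range_succ (n := m + 1)]
    simp

-- pascal_row on a nonnegative argument is the row of binomial coefficients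
theorem pv_pascal_row_eq (N : ℕ) :
    pascal_row (N : Int) = (List.range (N + 1)).map (fun k => (N.choose k : Int)) := by
  unfold pascal_row
  exact pv_pascal_aux N N le_rfl

-- loop invariant of B: with c = C(N, i-1) and the break never firing, altGo inserts (names[j-i], C(N,j))
theorem pv_altGo_inv (N : ℕ) (hN : 9 ≤ N) (names : List String) :
    ∀ (i : ℕ) (d : PySem.Dict String Int), 1 ≤ i → i + names.length ≤ 10 →
    altGo (N : Int) (i : Int) (N.choose (i - 1) : Int) names d
      = (names.zip ((List.range' i names.length).map (fun j => (N.choose j : Int)))).foldl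
          (fun d p => d.insert p.1 p.2) d := by
  induction names with
  | nil => intro i d _ _; simp [altGo]
  | cons name rest ih =>
    intro i d hi hlen
    rw [altGo]
    rw [if_neg (by simp only [List.length_cons] at hlen; omega)]
    have hstep : PySem.Int.floordiv ((N.choose (i - 1) : Int) * ((N : Int) - (i : Int) + 1)) (i : Int)
        = (N.choose i : Int) := pv_choose_step N i hi (by simp at hlen; omega)
    simp only [hstep]
    have h1 : ((i : Int) + 1) = ((i + 1 : ℕ) : Int) := by push_cast; ring
    have h2 : (N.choose i : Int) = (N.choose ((i + 1) - 1) : Int) := by norm_num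
    rw [h1, h2, ih (i + 1) _ (by omega) (by simp at hlen ⊢; omega)]
    simp [List.range']

-- degenerate case dim ≤ -2: row = [1], only 'void' is emitted on both sides
theorem pv_main_neg (dim : Int) (h : dim + 1 < 0) :
    simplex_fvector dim = simplex_fvector_alt dim := by
  have hrow : pascal_row (dim + 1) = [1] := by
    unfold pascal_row
    rw [PySem.List.pyRange_one_eq_nil (by omega)]
    rfl
  simp only [simplex_fvector, simplex_fvector_alt, hrow, fvNames, List.drop, altGo]
  rw [if_pos (by omega)]
  rfl

-- large case: n = dim+1 ≥ 9, all nine names are emitted with C(n,0..8) on both sides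
theorem pv_main_big (N : ℕ) (h : 9 ≤ N) :
    simplex_fvector ((N : Int) - 1) = simplex_fvector_alt ((N : Int) - 1) := by
  have hn : (N : Int) - 1 + 1 = (N : Int) := by ring
  simp only [simplex_fvector, simplex_fvector_alt, hn]
  rw [pv_pascal_row_eq, pv_zip_trunc]
  have hlen : fvNames.length = 9 := rfl
  rw [hlen]
  have htake : ((List.range (N + 1)).map (fun k => (N.choose k : Int))).take 9
      = (List.range 9).map (fun k => (N.choose k : Int)) := by
    have h9 : min 9 (N + 1) = 9 := by omega
    rw [← List.map_take, List.take_range, h9]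
  rw [htake]
  have hB := pv_altGo_inv N h (fvNames.drop 1) 1 (PySem.Dict.empty.insert "void" 1)
      (by omega) (by simp [fvNames])
  norm_num at hB
  simp only [List.drop_one]
  rw [hB]
  simp [fvNames, List.range', List.range_succ]

-- ===== VERDICT (by name: the statement is the Claim_ definition above) =====
theorem simplex_fvector_spec : Claim_equal_simplex_fvector := by
  intro dim _
  unfold Spec_simplex_fvector
  rcases lt_or_ge (dim + 1) 0 with h | h
  · exact pv_main_neg dim h
  · rcases lt_or_ge dim 8 with h8 | h8
    · -- dim ∈ [-1, 7]: finitely many cases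
      have hl : -1 ≤ dim := by omega
      interval_cases dim <;> decide
    · have : dim = ((dim + 1).toNat : Int) - 1 := by omega
      rw [this]
      exact pv_main_big (dim + 1).toNat (by omega)
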